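-- pv_equiv track=rewrite | github.com/Midhilesh4890/Leetcode-Problems | Google/Onsite/accounstmege2.py | find_similar_videos_dsu
-- ===== SOURCE A (Python) =====
-- class UnionFind:
--     def __init__(self, n):
--         self.parent = list(range(n))
--         self.rank = [0] * n
--
--     def find(self, x):
--         if self.parent[x] != x:
--             self.parent[x] = self.find(self.parent[x])  # Path compression
--         return self.parent[x]
--
--     def union(self, x, y):
--         root_x = self.find(x)
--         root_y = self.find(y)
--
--         if root_x == root_y:
--             return
--
--         # Union by rank
--         if self.rank[root_x] < self.rank[root_y]:
--             self.parent[root_x] = root_y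
--         elif self.rank[root_x] > self.rank[root_y]:
--             self.parent[root_y] = root_x
--         else:
--             self.parent[root_y] = root_x
--             self.rank[root_x] += 1
--
-- def find_similar_videos_dsu(videos, i):
--     # Build a tag to video mapping
--     tag_to_videos = {}
--     for j in range(i):
--         for tag in videos[j]:
--             if tag not in tag_to_videos:
--                 tag_to_videos[tag] = []
--             tag_to_videos[tag].append(j)
--
--     # Initialize DSU for videos up to i-1
--     uf = UnionFind(i)
--
--     # Union videos that share tags
--     for tag, video_list in tag_to_videos.items():
--         for j in range(1, len(video_list)):
--             uf.union(video_list[0], video_list[j])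
--
--     # Find videos that share tags with video i
--     similar_videos = set()
--     for tag in videos[i]:
--         if tag in tag_to_videos:
--             for j in tag_to_videos[tag]:
--                 similar_videos.add(j)
--
--     return sorted(list(similar_videos))
-- ===== SOURCE B (Python) =====
-- def find_similar_videos_dsu(videos, i):
--     target = set(videos[i])
--     return [j for j in range(i) if not target.isdisjoint(videos[j])]
-- ===== Notes on version B (the rewrite author's own statement) =====
-- stated objective: simpler
-- what changed: B drops A's inverted tag-to-videos index and its entirely unused UnionFind and computes the answer by a direct scan: j < i is kept iff set(videos[i]) intersects videos[j], yielding the already-sorted list.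
import Mathlib
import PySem

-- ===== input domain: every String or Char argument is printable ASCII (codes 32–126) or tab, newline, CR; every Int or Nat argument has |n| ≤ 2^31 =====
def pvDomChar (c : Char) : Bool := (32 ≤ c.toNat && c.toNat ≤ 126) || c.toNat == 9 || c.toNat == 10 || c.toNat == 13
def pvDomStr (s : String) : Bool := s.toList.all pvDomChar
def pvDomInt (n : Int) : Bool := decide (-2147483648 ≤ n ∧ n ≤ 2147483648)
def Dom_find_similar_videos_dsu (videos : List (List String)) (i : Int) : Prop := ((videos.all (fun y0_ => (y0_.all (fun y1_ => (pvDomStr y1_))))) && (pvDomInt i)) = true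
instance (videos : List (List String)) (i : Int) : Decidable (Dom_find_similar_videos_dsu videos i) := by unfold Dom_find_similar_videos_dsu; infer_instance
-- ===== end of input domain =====

-- B drops A's dead UnionFind and inverted index: it scans the earlier videos directly
-- against set(videos[i]) (objective: simpler; the return value is identical).

-- ===== PORT A =====
-- UnionFind.find with path compression; fuel bounds the parent-chain length (the chain in
-- A is always shorter than len(parent), so fuel = parent.length never runs out on A's calls).
def ufFind : Nat → List Int → Int → List Int × Int
  | 0, parent, x => (parent, x)
  | fuel+1, parent, x =>
    let px := PySem.List.pyGetD parent x x
    if px ≠ x then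
      let pr := ufFind fuel parent px
      (PySem.List.pySetD pr.1 x pr.2, pr.2)
    else (parent, x)

-- UnionFind.union (by rank), threading (parent, rank) as state
def ufUnion (parent rank : List Int) (x y : Int) : List Int × List Int :=
  let f1 := ufFind parent.length parent x
  let f2 := ufFind f1.1.length f1.1 y
  let root_x := f1.2
  let root_y := f2.2
  if root_x = root_y then (f2.1, rank)
  else if PySem.List.pyGetD rank root_x 0 < PySem.List.pyGetD rank root_y 0 then
    (PySem.List.pySetD f2.1 root_x root_y, rank)
  else if PySem.List.pyGetD rank root_y 0 < PySem.List.pyGetD rank root_x 0 then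
    (PySem.List.pySetD f2.1 root_y root_x, rank)
  else
    (PySem.List.pySetD f2.1 root_y root_x,
     PySem.List.pySetD rank root_x (PySem.List.pyGetD rank root_x 0 + 1))

def find_similar_videos_dsu (videos : List (List String)) (i : Int) : List Int :=
  -- tag_to_videos: 'if tag not in d: d[tag] = []' then 'd[tag].append(j)' is Dict.modify tag [] (· ++ [j])
  let tag_to_videos : PySem.Dict String (List Int) :=
    (PySem.List.pyRange 0 i 1).foldl (fun d j =>
      ((PySem.List.pyGet? videos j).getD []).foldl (fun d tag =>
        PySem.Dict.modify d tag [] (fun l => l ++ [j])) d) PySem.Dict.empty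
  -- uf = UnionFind(i): parent = list(range(i)), rank = [0]*i
  let uf0 : List Int × List Int := (PySem.List.pyRange 0 i 1, List.replicate i.toNat 0)
  -- union videos that share tags (state threaded; the result is never read afterwards, as in A)
  let _uf := tag_to_videos.items.foldl (fun st p =>
      (PySem.List.pyRange 1 p.2.length 1).foldl (fun st j =>
        ufUnion st.1 st.2 (PySem.List.pyGetD p.2 0 0) (PySem.List.pyGetD p.2 j 0)) st) uf0
  -- collect earlier videos sharing a tag with videos[i]
  let sim : PySem.Set Int :=
    ((PySem.List.pyGet? videos i).getD []).foldl (fun s tag =>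
      if PySem.Dict.contains tag_to_videos tag then
        (PySem.Dict.getD tag_to_videos tag []).foldl (fun s j => PySem.Set.add s j) s
      else s) PySem.Set.empty
  PySem.List.sorted sim (fun x => x) false

-- ===== PORT B =====
def find_similar_videos_dsu_alt (videos : List (List String)) (i : Int) : List Int :=
  let target : PySem.Set String := PySem.Set.ofList ((PySem.List.pyGet? videos i).getD [])
  (PySem.List.pyRange 0 i 1).filter (fun j =>
    !(PySem.Set.isdisjoint target ((PySem.List.pyGet? videos j).getD [])))

-- ===== PRECONDITION & SPEC =====
-- Pre_ excludes exactly the inputs where the Python raises IndexError: videos[i] (and, for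
-- i > len(videos), an earlier videos[j]) is out of range.
def Pre_find_similar_videos_dsu (videos : List (List String)) (i : Int) : Prop :=
  PySem.Raise.InRange videos.length i
instance (videos : List (List String)) (i : Int) : Decidable (Pre_find_similar_videos_dsu videos i) := by unfold Pre_find_similar_videos_dsu; infer_instance
def pvWitness_find_similar_videos_dsu : List (List String) × Int := ([["a"], ["b", "a"]], 1)

def Spec_find_similar_videos_dsu (videos : List (List String)) (i : Int) (out : List Int) : Prop := out = find_similar_videos_dsu_alt videos i
instance (videos : List (List String)) (i : Int) (out : List Int) : Decidable (Spec_find_similar_videos_dsu videos i out) := by unfold Spec_find_similar_videos_dsu; infer_instance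

-- ===== CLAIM (what is proved, stated in full; the proofs are below) =====
def Claim_equal_find_similar_videos_dsu : Prop := ∀ (videos : List (List String)) (i : Int), Dom_find_similar_videos_dsu videos i → Pre_find_similar_videos_dsu videos i → Spec_find_similar_videos_dsu videos i (find_similar_videos_dsu videos i)

-- ===== LEMMAS AND PROOFS =====

-- inner dict-building fold over one tag list
lemma mem_getD_foldl_modify (ts : List String) (d : PySem.Dict String (List Int)) (j : Int)
    (tag : String) (y : Int) :
    y ∈ (ts.foldl (fun d t => PySem.Dict.modify d t [] (fun l => l ++ [j])) d).getD tag []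
      ↔ y ∈ d.getD tag [] ∨ (tag ∈ ts ∧ y = j) := by
  induction ts generalizing d with
  | nil => simp
  | cons t ts ih =>
    simp only [List.foldl_cons, ih, PySem.Dict.getD_modify, List.mem_cons]
    by_cases h : tag = t
    · subst h
      simp
      tauto
    · simp [h]

-- the whole tag_to_videos build
lemma mem_getD_buildDict (videos : List (List String)) (l : List Int)
    (d : PySem.Dict String (List Int)) (tag : String) (y : Int) :
    y ∈ (l.foldl (fun d j =>
        ((PySem.List.pyGet? videos j).getD []).foldl (fun d t =>
          PySem.Dict.modify d t [] (fun l' => l' ++ [j])) d) d).getD tag []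
      ↔ y ∈ d.getD tag [] ∨ ∃ j ∈ l, tag ∈ (PySem.List.pyGet? videos j).getD [] ∧ y = j := by
  induction l generalizing d with
  | nil => simp
  | cons a l ih =>
    simp only [List.foldl_cons, ih, mem_getD_foldl_modify, List.mem_cons]
    constructor
    · rintro (⟨h | ⟨h1, h2⟩⟩ | ⟨j, hj, ht, hy⟩)
      · exact Or.inl h
      · exact Or.inr ⟨a, Or.inl rfl, h1, h2⟩
      · exact Or.inr ⟨j, Or.inr hj, ht, hy⟩
    · rintro (h | ⟨j, (rfl | hj), ht, hy⟩)
      · exact Or.inl (Or.inl h)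
      · exact Or.inl (Or.inr ⟨ht, hy⟩)
      · exact Or.inr ⟨j, hj, ht, hy⟩

-- one collecting step: adding all of vl to the set s
lemma mem_foldl_set_add (vl : List Int) (s : PySem.Set Int) (y : Int) :
    y ∈ vl.foldl (fun s j => PySem.Set.add s j) s ↔ y ∈ s ∨ y ∈ vl := by
  induction vl generalizing s with
  | nil => simp
  | cons a vl ih => simp [ih, PySem.Set.mem_add]; tauto

lemma nodup_foldl_set_add (vl : List Int) (s : PySem.Set Int) (h : s.Nodup) :
    (vl.foldl (fun s j => PySem.Set.add s j) s).Nodup := by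
  induction vl generalizing s with
  | nil => exact h
  | cons a vl ih => exact ih _ (PySem.Set.nodup_add s a h)

-- the sim-collecting fold: membership
lemma mem_collect (T : PySem.Dict String (List Int)) (tags : List String)
    (s : PySem.Set Int) (y : Int) :
    y ∈ tags.foldl (fun s tag =>
        if PySem.Dict.contains T tag then
          (PySem.Dict.getD T tag []).foldl (fun s j => PySem.Set.add s j) s
        else s) s
      ↔ y ∈ s ∨ ∃ tag ∈ tags, y ∈ PySem.Dict.getD T tag [] := by
  induction tags generalizing s with
  | nil => simp
  | cons t tags ih =>
    simp only [List.foldl_cons, ih, List.mem_cons]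
    by_cases h : PySem.Dict.contains T t
    · simp only [h, if_true, mem_foldl_set_add]
      constructor
      · rintro (⟨h1 | h1⟩ | ⟨tag, ht, hy⟩)
        · exact Or.inl h1
        · exact Or.inr ⟨t, Or.inl rfl, h1⟩
        · exact Or.inr ⟨tag, Or.inr ht, hy⟩
      · rintro (h1 | ⟨tag, (rfl | ht), hy⟩)
        · exact Or.inl (Or.inl h1)
        · exact Or.inl (Or.inr hy)
        · exact Or.inr ⟨tag, ht, hy⟩
    · simp only [h]
      have hget : PySem.Dict.getD T t ([] : List Int) = [] := by
        apply PySem.Dict.getD_of_not_contains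
        simpa using h
      constructor
      · rintro (h1 | ⟨tag, ht, hy⟩)
        · exact Or.inl h1
        · exact Or.inr ⟨tag, Or.inr ht, hy⟩
      · rintro (h1 | ⟨tag, (rfl | ht), hy⟩)
        · exact Or.inl h1
        · rw [hget] at hy; cases hy
        · exact Or.inr ⟨tag, ht, hy⟩

lemma nodup_collect (T : PySem.Dict String (List Int)) (tags : List String)
    (s : PySem.Set Int) (h : s.Nodup) :
    (tags.foldl (fun s tag =>
        if PySem.Dict.contains T tag then
          (PySem.Dict.getD T tag []).foldl (fun s j => PySem.Set.add s j) s
        else s) s).Nodup := by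
  induction tags generalizing s with
  | nil => exact h
  | cons t tags ih =>
    simp only [List.foldl_cons]
    split
    · exact ih _ (nodup_foldl_set_add _ _ h)
    · exact ih _ h

-- B's membership test, as a Prop
lemma isdisjoint_false_iff (s : PySem.Set String) (t : List String) :
    PySem.Set.isdisjoint s t = false ↔ ∃ x ∈ s, x ∈ t := by
  rw [Bool.eq_false_iff, Ne, PySem.Set.isdisjoint_iff]
  push Not
  simp

-- ===== VERDICT (by name: the statement is the Claim_ definition above) =====
theorem find_similar_videos_dsu_spec : Claim_equal_find_similar_videos_dsu := by
  intro videos i _ _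
  unfold Spec_find_similar_videos_dsu find_similar_videos_dsu find_similar_videos_dsu_alt
  simp only []
  apply PySem.List.sorted_eq_of_perm_of_pairwise_lt
  · -- the filtered range is a permutation of the collected set
    apply (List.perm_ext_iff_of_nodup ?_ ?_).mpr
    · intro y
      rw [mem_collect]
      simp only [List.mem_filter, PySem.List.mem_pyRange_one, Bool.not_eq_eq_eq_not,
        Bool.not_true, isdisjoint_false_iff, mem_getD_buildDict, PySem.Dict.getD_empty,
        PySem.Set.empty, List.not_mem_nil, false_or, PySem.Set.mem_ofList]
      constructor
      · rintro ⟨⟨h1, h2⟩, t, ht, htj⟩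
        exact ⟨t, ht, y, ⟨h1, h2⟩, htj, rfl⟩
      · rintro ⟨t, ht, j, ⟨h1, h2⟩, htj, rfl⟩
        exact ⟨⟨h1, h2⟩, t, ht, htj⟩
    · exact List.Nodup.filter _ (PySem.List.nodup_pyRange_one 0 i)
    · exact nodup_collect _ _ _ List.nodup_nil
  · exact List.Pairwise.filter _ (PySem.List.pairwise_lt_pyRange_one 0 i)
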